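-- pv_equiv track=rewrite | github.com/Fredler21/Freddy | modules/visualizer.py | ip_activity_map
-- ===== SOURCE A (Python) =====
-- from collections import Counter
--
-- def ip_activity_map(ioc_ips: list[str], raw_evidence: str = "") -> str:
--     """Generate an IP activity summary visualization."""
--     if not ioc_ips:
--         return "No IP addresses to visualize."
--
--     lines: list[str] = []
--     lines.append("┌─────────────────────────────────────────────┐")
--     lines.append("│         SUSPICIOUS IP ACTIVITY MAP          │")
--     lines.append("├─────────────────────────────────────────────┤")
--
--     ip_counts = Counter()
--     for ip in ioc_ips:
--         ip_counts[ip] = raw_evidence.count(ip)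
--
--     for ip, count in ip_counts.most_common(15):
--         bar_len = min(20, max(1, count))
--         bar = "█" * bar_len
--         line = f"│ {ip:<16} {bar:<20} ({count:>4}x) │"
--         lines.append(line[:46] + "│")
--
--     lines.append("└─────────────────────────────────────────────┘")
--     return "\n".join(lines)
-- ===== SOURCE B (Python) =====
-- def ip_activity_map(ioc_ips: list[str], raw_evidence: str = "") -> str:
--     """Generate an IP activity summary visualization."""
--     if not ioc_ips:
--         return "No IP addresses to visualize."
--     # one count per DISTINCT ip (first-occurrence order), instead of recounting duplicates
--     entries = [(ip, raw_evidence.count(ip)) for ip in dict.fromkeys(ioc_ips)]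
--     # top 15 by count: walk the distinct counts in descending order (bucket selection,
--     # no stable sort of the entries), collecting each count's entries in entry order
--     top = [e for c in sorted({c for _, c in entries}, reverse=True)
--              for e in entries if e[1] == c][:15]
--     rows = [("│ " + ip.ljust(16) + " " + ("█" * min(20, max(1, c))).ljust(20)
--              + " (" + str(c).rjust(4) + "x) │")[:46] + "│" for ip, c in top]
--     return "\n".join(
--         ["┌─────────────────────────────────────────────┐",
--          "│         SUSPICIOUS IP ACTIVITY MAP          │",
--          "├─────────────────────────────────────────────┤"]
--         + rows
--         + ["└─────────────────────────────────────────────┘"])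
-- ===== Notes on version B (the rewrite author's own statement) =====
-- stated objective: alternative
-- what changed: Replaces Counter-with-recounted-duplicates plus most_common's stable sort of all entries by: dedup the IPs first (one count per distinct IP), then a bucket-style selection that walks the distinct count values in descending order collecting each bucket's entries in entry order.
import Mathlib
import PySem

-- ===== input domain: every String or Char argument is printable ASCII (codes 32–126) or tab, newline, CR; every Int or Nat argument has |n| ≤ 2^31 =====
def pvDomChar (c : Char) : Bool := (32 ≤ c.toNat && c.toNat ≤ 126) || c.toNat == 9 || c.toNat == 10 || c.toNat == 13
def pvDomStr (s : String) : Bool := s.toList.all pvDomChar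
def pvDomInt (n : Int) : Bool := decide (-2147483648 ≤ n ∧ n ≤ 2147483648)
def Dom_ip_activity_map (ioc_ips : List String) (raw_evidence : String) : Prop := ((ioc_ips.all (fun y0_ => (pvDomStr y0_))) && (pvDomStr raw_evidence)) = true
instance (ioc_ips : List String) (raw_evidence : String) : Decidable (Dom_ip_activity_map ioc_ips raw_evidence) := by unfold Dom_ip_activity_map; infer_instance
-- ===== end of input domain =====

-- B replaces Counter-with-recounted-duplicates + most_common's stable sort of all entries by
-- a dedup-first count and a bucket-style selection over the distinct counts in descending
-- order (objective: alternative; same cost class, no speed claim).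

-- ===== PORT A =====
-- A's f-string row is ported by hand (exact for the format specs '<16', '<20', '>4' used here):
-- '{v:<w}' = v padded right with spaces to width w, '{v:>w}' = padded left; str(count) = PySem.Int.toChars.
def ip_activity_map (ioc_ips : List String) (raw_evidence : String) : String :=
  if ioc_ips = [] then "No IP addresses to visualize." else
  let lines : List String :=
    ["┌─────────────────────────────────────────────┐",
     "│         SUSPICIOUS IP ACTIVITY MAP          │",
     "├─────────────────────────────────────────────┤"]
  let ip_counts : PySem.Dict String Int :=
    ioc_ips.foldl (fun d ip => d.insert ip ((PySem.Str.count raw_evidence ip : Int))) PySem.Dict.empty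
  -- Counter.most_common(15) = the entries stably sorted by count descending, first 15
  let mc := (PySem.List.sorted ip_counts.items (fun kv => kv.2) true).take 15
  let lines := mc.foldl (fun acc kv =>
    let bar_len : Int := min 20 (max 1 kv.2)
    let bar : List Char := List.replicate bar_len.toNat '█'
    let line : List Char :=
      "│ ".toList ++ (kv.1.toList ++ List.replicate (16 - kv.1.toList.length) ' ') ++ [' ']
        ++ (bar ++ List.replicate (20 - bar.length) ' ') ++ " (".toList
        ++ (List.replicate (4 - (PySem.Int.toChars kv.2).length) ' ' ++ PySem.Int.toChars kv.2)
        ++ "x) │".toList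
    acc ++ [String.ofList (PySem.List.slice line none (some 46) ++ "│".toList)]) lines
  let lines := lines ++ ["└─────────────────────────────────────────────┘"]
  PySem.Str.join "\n" lines

-- ===== PORT B =====
-- B's row literal (ljust/rjust written out as space padding; exact for these widths)
def pvRow_alt (ip : String) (c : Int) : String :=
  let bar_len : Int := min 20 (max 1 c)
  let bar : List Char := List.replicate bar_len.toNat '█'
  let line : List Char :=
    "│ ".toList ++ (ip.toList ++ List.replicate (16 - ip.toList.length) ' ') ++ [' ']
      ++ (bar ++ List.replicate (20 - bar.length) ' ') ++ " (".toList
      ++ (List.replicate (4 - (PySem.Int.toChars c).length) ' ' ++ PySem.Int.toChars c)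
      ++ "x) │".toList
  String.ofList (PySem.List.slice line none (some 46) ++ "│".toList)

def ip_activity_map_alt (ioc_ips : List String) (raw_evidence : String) : String :=
  if ioc_ips = [] then "No IP addresses to visualize." else
  -- one count per DISTINCT ip, in first-occurrence order (dict.fromkeys)
  let entries : List (String × Int) :=
    (PySem.List.dedup ioc_ips).map (fun ip => (ip, (PySem.Str.count raw_evidence ip : Int)))
  -- bucket selection: distinct count values descending, each bucket's entries in entry order
  let top := ((PySem.List.sorted (PySem.Set.ofList (entries.map (fun e => e.2))) (fun c => c) true).flatMap
      (fun c => entries.filter (fun e => e.2 == c))).take 15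
  PySem.Str.join "\n"
    (["┌─────────────────────────────────────────────┐",
      "│         SUSPICIOUS IP ACTIVITY MAP          │",
      "├─────────────────────────────────────────────┤"]
      ++ top.map (fun e => pvRow_alt e.1 e.2)
      ++ ["└─────────────────────────────────────────────┘"])

-- ===== PRECONDITION & SPEC =====
def Spec_ip_activity_map (ioc_ips : List String) (raw_evidence : String) (out : String) : Prop := out = ip_activity_map_alt ioc_ips raw_evidence
instance (ioc_ips : List String) (raw_evidence : String) (out : String) : Decidable (Spec_ip_activity_map ioc_ips raw_evidence out) := by unfold Spec_ip_activity_map; infer_instance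

-- ===== CLAIM (what is proved, stated in full; the proofs are below) =====
def Claim_equal_ip_activity_map : Prop := ∀ (ioc_ips : List String) (raw_evidence : String), Dom_ip_activity_map ioc_ips raw_evidence → Spec_ip_activity_map ioc_ips raw_evidence (ip_activity_map ioc_ips raw_evidence)

-- ===== LEMMAS AND PROOFS =====

-- insertBy's cons equation
theorem insertBy_cons {α : Type} (before : α → α → Bool) (x y : α) (ys : List α) :
    PySem.List.insertBy before x (y :: ys) =
      if before x y then x :: y :: ys else y :: PySem.List.insertBy before x ys := by
  simp [PySem.List.insertBy]

-- insertBy skips a prefix it does not insert into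
theorem insertBy_append_of_not {α : Type} (before : α → α → Bool) (x : α) (ys zs : List α)
    (h : ∀ y ∈ ys, before x y = false) :
    PySem.List.insertBy before x (ys ++ zs) = ys ++ PySem.List.insertBy before x zs := by
  induction ys with
  | nil => simp
  | cons y ys ih =>
    have hy : before x y = false := h y (by simp)
    simp only [List.cons_append, insertBy_cons, hy, Bool.false_eq_true, if_false]
    rw [ih (fun y hy => h y (by simp [hy]))]

-- insertBy puts x in front when it goes before everything
theorem insertBy_front {α : Type} (before : α → α → Bool) (x : α) (zs : List α)
    (h : ∀ y ∈ zs, before x y = true) :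
    PySem.List.insertBy before x zs = x :: zs := by
  cases zs with
  | nil => rfl
  | cons y ys => rw [insertBy_cons, h y (by simp)]; simp

-- inserting x into the bucket decomposition appends it to its own (present) bucket
theorem insertBy_flatMap_buckets {α : Type} (k : α → Int) (x : α) :
    ∀ (cs : List Int) (xs : List α), cs.Pairwise (· > ·) → k x ∈ cs →
    PySem.List.insertBy (fun a b => decide (k b < k a)) x
        (cs.flatMap (fun c => xs.filter (fun a => k a == c)))
      = cs.flatMap (fun c => xs.filter (fun a => k a == c) ++ if k x == c then [x] else []) := by
  intro cs
  induction cs with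
  | nil => intro xs _ hmem; simp at hmem
  | cons c cs ih =>
    intro xs hpw hmem
    have hlt : ∀ c' ∈ cs, c' < c := by
      intro c' hc'; exact (List.pairwise_cons.mp hpw).1 c' hc'
    have hfilt : ∀ y ∈ xs.filter (fun a => k a == c), k y = c := by
      intro y hy
      have := List.of_mem_filter hy
      simpa using this
    simp only [List.flatMap_cons]
    by_cases hx : k x = c
    · -- x belongs to the head bucket: it goes right after it
      rw [insertBy_append_of_not _ _ _ _ (by
        intro y hy
        have : k y = c := hfilt y hy
        simp [this, hx])]
      rw [insertBy_front _ _ _ (by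
        intro y hy
        rcases List.mem_flatMap.mp hy with ⟨c', hc', hy'⟩
        have hkc' : k y = c' := by simpa using List.of_mem_filter hy'
        have : c' < c := hlt c' hc'
        simp [hkc', hx]; omega)]
      have hne : ∀ c' ∈ cs, ¬ (k x == c') = true := by
        intro c' hc'
        have := hlt c' hc'
        simp [hx]; omega
      have : (cs.flatMap (fun c' => xs.filter (fun a => k a == c') ++ if k x == c' then [x] else []))
           = cs.flatMap (fun c' => xs.filter (fun a => k a == c')) := by
        apply List.flatMap_congr  -- pointwise on members
        intro c' hc'
        simp [hne c' hc']
      rw [this, if_pos (by simp [hx])]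
      simp
    · -- x's bucket is further down: skip the head bucket and recurse
      have hmem' : k x ∈ cs := by
        rcases List.mem_cons.mp hmem with h | h
        · exact absurd h hx
        · exact h
      have hxlt : k x < c := hlt _ hmem'
      rw [insertBy_append_of_not _ _ _ _ (by
        intro y hy
        have : k y = c := hfilt y hy
        simp [this]; omega)]
      rw [ih xs (List.pairwise_cons.mp hpw).2 hmem']
      rw [if_neg (by simp [hx])]
      simp

-- the stable descending sort IS the concatenation of key buckets, for ANY strictly
-- descending key list covering the elements' keys
theorem sorted_rev_eq_flatMap_buckets {α : Type} (k : α → Int) :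
    ∀ (xs : List α) (cs : List Int), cs.Pairwise (· > ·) → (∀ a ∈ xs, k a ∈ cs) →
    PySem.List.sorted xs k true = cs.flatMap (fun c => xs.filter (fun a => k a == c)) := by
  intro xs
  induction xs using List.reverseRecOn with
  | nil => intro cs _ _; rw [PySem.List.sorted_rev_eq_foldl_insertBy]; simp
  | append_singleton xs x ih =>
    intro cs hpw hcov
    have hcovxs : ∀ a ∈ xs, k a ∈ cs := fun a ha => hcov a (by simp [ha])
    have hx : k x ∈ cs := hcov x (by simp)
    rw [PySem.List.sorted_rev_eq_foldl_insertBy, List.foldl_append,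
        ← PySem.List.sorted_rev_eq_foldl_insertBy]
    simp only [List.foldl_cons, List.foldl_nil]
    rw [ih cs hpw hcovxs, insertBy_flatMap_buckets k x cs xs hpw hx]
    apply List.flatMap_congr
    intro c _
    simp [List.filter_append, List.filter_cons, beq_iff_eq]

-- the Counter built by 'ip_counts[ip] = f(ip)' holds one item per distinct ip,
-- in first-occurrence order, with value f ip
theorem items_insert_loop (f : String → Int) (l : List String) :
    (l.foldl (fun d ip => d.insert ip (f ip)) PySem.Dict.empty).items
      = (PySem.Set.ofList l).map (fun ip => (ip, f ip)) := by
  induction l using List.reverseRecOn with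
  | nil => rfl
  | append_singleton l x ih =>
    rw [List.foldl_append]
    simp only [List.foldl_cons, List.foldl_nil]
    rw [PySem.Set.ofList_append_singleton]
    set D := l.foldl (fun d ip => d.insert ip (f ip)) PySem.Dict.empty with hD
    have hcont : D.contains x = ((PySem.Set.ofList l).contains x) := by
      simp only [PySem.Dict.contains, ih, List.any_map, Function.comp_def]
      apply Bool.eq_iff_iff.mpr
      simp [List.any_eq_true, PySem.Set.contains, PySem.Set.mem_ofList]
    by_cases hx : x ∈ PySem.Set.ofList l
    · have hc : D.contains x = true := by
        rw [hcont]; exact (PySem.Set.contains_iff _ _).mpr hx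
      simp only [PySem.Dict.insert, hc, if_pos]
      rw [PySem.Set.add_of_mem hx, ih]
      simp only [List.map_map]
      apply List.map_congr_left
      intro ip _
      by_cases hip : ip = x
      · simp [Function.comp, hip]
      · simp [Function.comp, hip]
    · have hc : ¬ D.contains x = true := by
        rw [hcont]
        simp only [PySem.Set.contains_iff]
        exact hx
      simp only [PySem.Dict.insert, hc, if_neg, Bool.not_eq_true]
      rw [PySem.Set.add_of_not_mem hx, ih]
      simp

-- the descending sort of a set of Ints is strictly descending
theorem sorted_rev_set_pairwise_gt (ys : List Int) :
    (PySem.List.sorted (PySem.Set.ofList ys) (fun c => c) true).Pairwise (· > ·) := by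
  have h1 := PySem.List.sorted_pairwise_rev (PySem.Set.ofList ys) (fun c => c)
  have h2 : (PySem.List.sorted (PySem.Set.ofList ys) (fun c => c) true).Nodup :=
    (PySem.List.sorted_perm (PySem.Set.ofList ys) (fun c => c) true).symm.nodup
      (PySem.Set.nodup_ofList ys)
  have := h1.and h2
  exact this.imp (by intro a b h; rcases h with ⟨hle, hne⟩; omega)

-- ===== VERDICT (by name: the statement is the Claim_ definition above) =====
theorem ip_activity_map_spec : Claim_equal_ip_activity_map := by
  intro ioc_ips raw_evidence _
  unfold Spec_ip_activity_map ip_activity_map ip_activity_map_alt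
  by_cases hnil : ioc_ips = []
  · simp [hnil]
  · simp only [hnil, if_false]
    -- name the shared pieces
    set f : String → Int := fun ip => (PySem.Str.count raw_evidence ip : Int) with hf
    have hitems : (ioc_ips.foldl (fun d ip => d.insert ip (f ip)) PySem.Dict.empty).items
        = (PySem.Set.ofList ioc_ips).map (fun ip => (ip, f ip)) := items_insert_loop f ioc_ips
    set entries : List (String × Int) := (PySem.Set.ofList ioc_ips).map (fun ip => (ip, f ip)) with he
    have hsorted : PySem.List.sorted entries (fun kv => kv.2) true
        = (PySem.List.sorted (PySem.Set.ofList (entries.map (fun e => e.2))) (fun c => c) true).flatMap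
            (fun c => entries.filter (fun e => e.2 == c)) := by
      apply sorted_rev_eq_flatMap_buckets (fun kv : String × Int => kv.2) entries
      · exact sorted_rev_set_pairwise_gt _
      · intro a ha
        rw [PySem.List.mem_sorted]
        exact (PySem.Set.mem_ofList _ _).mpr (List.mem_map.mpr ⟨a, ha, rfl⟩)
    rw [PySem.List.dedup_eq_ofList, ← he, hitems, hsorted]
    rw [PySem.List.foldl_append_singleton_eq_map]
    rfl
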